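-- pv_equiv track=rewrite | github.com/KiranMann/agent | tools/automated_reasoning/rule_parser.py | _preprocess_rule_string
-- ===== SOURCE A (Python) =====
-- def _preprocess_rule_string(rule_string: str) -> str:
--     """Remove comments and normalize whitespace.
--
--     Args:
--         rule_string: The rule string to preprocess.
--
--     Returns:
--         The preprocessed rule string.
--     """
--     # Remove comments (lines starting with #)
--     lines = []
--     for line in rule_string.split("\n"):
--         clean_line = line[: line.index("#")] if "#" in line else line
--         if clean_line.strip():  # Only add non-empty lines
--             lines.append(clean_line)
--
--     rule_string = " ".join(lines)
--     # Normalize whitespace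
--     rule_string = " ".join(rule_string.split())
--     return rule_string
-- ===== SOURCE B (Python) =====
-- def _preprocess_rule_string(rule_string: str) -> str:
--     """Single left-to-right scan: skip comment chars until newline, emit words."""
--     words = []
--     word = []
--     in_comment = False
--     for ch in rule_string:
--         if ch == "\n":
--             in_comment = False
--         if in_comment:
--             continue
--         if ch == "#":
--             in_comment = True
--         elif ch.isspace():
--             if word:
--                 words.append("".join(word))
--                 word = []
--         else:
--             word.append(ch)
--     if word:
--         words.append("".join(word))
--     return " ".join(words)
-- ===== Notes on version B (the rewrite author's own statement) =====
-- stated objective: alternative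
-- what changed: A splits the string into lines, truncates each line at '#' via index/slice, filters blank lines, joins with spaces and then re-splits and re-joins to normalize whitespace; B makes one left-to-right scan over the characters with an in_comment flag, skipping comment characters until the next newline and emitting the words directly, joining them once at the end.
import Mathlib
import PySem

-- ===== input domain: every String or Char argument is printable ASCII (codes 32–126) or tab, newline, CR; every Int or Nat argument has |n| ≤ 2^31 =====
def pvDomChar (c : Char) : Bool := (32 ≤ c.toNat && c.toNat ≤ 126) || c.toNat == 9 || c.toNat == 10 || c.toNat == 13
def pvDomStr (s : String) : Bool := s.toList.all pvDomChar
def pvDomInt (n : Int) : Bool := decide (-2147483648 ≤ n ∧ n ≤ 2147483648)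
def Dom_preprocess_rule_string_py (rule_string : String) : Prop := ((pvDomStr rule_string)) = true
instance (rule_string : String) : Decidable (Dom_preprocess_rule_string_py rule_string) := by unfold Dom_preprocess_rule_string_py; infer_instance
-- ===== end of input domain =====

-- B replaces A's split-into-lines / per-line comment-truncation / double join-and-resplit pipeline by a
-- single left-to-right character scan that skips comment characters and emits words directly (objective:
-- alternative single-pass algorithm; same return value, no mutation involved).

-- ===== PORT A =====
-- port of A: split on "\n"; per line cut at '#' (line[:line.index('#')] via find/slice), keep lines whose
-- strip is nonempty; join with " ", then " ".join(split()).
def preprocess_rule_string_py (rule_string : String) : String :=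
  let lines : List (List Char) :=
    (PySem.Chars.splitOn rule_string.toList ['\n']).foldl
      (fun lines line =>
        let clean_line : List Char :=
          if PySem.Chars.isIn ['#'] line = true then
            PySem.Chars.slice line none (some (PySem.Chars.find line ['#']))
          else line
        if (PySem.Chars.strip clean_line).isEmpty = false then lines ++ [clean_line] else lines)
      []
  let rs1 : List Char := PySem.Chars.join [' '] lines
  let rs2 : List Char := PySem.Chars.join [' '] (PySem.Chars.split₀ rs1)
  String.ofList rs2

-- ===== PORT B =====
-- one step of Source B's for-loop over characters; state = (in_comment, current word, words so far)
def pvStepB (st : Bool × List Char × List (List Char)) (ch : Char) :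
    Bool × List Char × List (List Char) :=
  let inComment := if ch = '\n' then false else st.1
  if inComment = true then (inComment, st.2.1, st.2.2)
  else if ch = '#' then (true, st.2.1, st.2.2)
  else if PySem.Chars.isspace ch = true then
    (inComment, [], if st.2.1.isEmpty = true then st.2.2 else st.2.2 ++ [st.2.1])
  else (inComment, st.2.1 ++ [ch], st.2.2)

def preprocess_rule_string_py_alt (rule_string : String) : String :=
  let st := rule_string.toList.foldl pvStepB (false, [], [])
  let words := if st.2.1.isEmpty = true then st.2.2 else st.2.2 ++ [st.2.1]
  String.ofList (PySem.Chars.join [' '] words)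

-- ===== PRECONDITION & SPEC =====
def Spec_preprocess_rule_string_py (rule_string : String) (out : String) : Prop := out = preprocess_rule_string_py_alt rule_string
instance (rule_string : String) (out : String) : Decidable (Spec_preprocess_rule_string_py rule_string out) := by unfold Spec_preprocess_rule_string_py; infer_instance

-- ===== CLAIM (what is proved, stated in full; the proofs are below) =====
def Claim_equal_preprocess_rule_string_py : Prop := ∀ (rule_string : String), Dom_preprocess_rule_string_py rule_string → Spec_preprocess_rule_string_py rule_string (preprocess_rule_string_py rule_string)

-- ===== LEMMAS AND PROOFS =====

-- non-space predicate
def pvNS (c : Char) : Bool := !PySem.Chars.isspace c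

-- Python str.split(): the words of a character list
def pvW : List Char → List (List Char)
  | [] => []
  | c :: r =>
      if PySem.Chars.isspace c then pvW r
      else (c :: r.takeWhile pvNS) :: pvW (r.dropWhile pvNS)
termination_by l => l.length
decreasing_by
  · simp
  · have := List.length_dropWhile_le pvNS r; simp; omega

-- comment removal keeping newlines: drop from '#' to just before the next '\n'
def pvDC : List Char → List Char
  | [] => []
  | c :: r => if c = '#' then pvDC (r.dropWhile (· ≠ '\n')) else c :: pvDC r
termination_by l => l.length
decreasing_by
  · have := List.length_dropWhile_le (fun c : Char => !decide (c = '\n')) r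
    simp only [ne_eq, decide_not, List.length_cons]
    omega
  · simp

-- split on '\n'
def pvSplitNl : List Char → List (List Char)
  | [] => [[]]
  | c :: r => if c = '\n' then [] :: pvSplitNl r else (pvSplitNl r).modifyHead (c :: ·)

def pvTrunc (l : List Char) : List Char := l.takeWhile (· ≠ '#')

-- join with a single separator character list
def pvJ (sep : List Char) : List (List Char) → List Char
  | [] => []
  | [x] => x
  | x :: y :: r => x ++ sep ++ pvJ sep (y :: r)

theorem pvJoin_eq (sep : List Char) (xs : List (List Char)) :
    PySem.Chars.join sep xs = pvJ sep xs := by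
  induction xs with
  | nil => simp [PySem.Chars.join, List.intercalate, pvJ]
  | cons x xs ih =>
    cases xs with
    | nil => simp [PySem.Chars.join, List.intercalate, pvJ]
    | cons y r =>
      simp only [PySem.Chars.join, List.intercalate] at ih ⊢
      rw [List.intersperse_cons₂]
      simp only [List.flatten_cons, pvJ]
      rw [← ih]
      simp

theorem pvSplitNl_ne_nil (l : List Char) : pvSplitNl l ≠ [] := by
  induction l with
  | nil => simp [pvSplitNl]
  | cons c r ih =>
    simp only [pvSplitNl]
    split
    · simp
    · cases h : pvSplitNl r with
      | nil => exact absurd h ih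
      | cons a t => simp

-- structure of pvSplitNl: head is takeWhile, tail restarts after the first '\n'
theorem pvSplitNl_eq (r : List Char) :
    pvSplitNl r = r.takeWhile (· ≠ '\n') ::
      (match r.dropWhile (· ≠ '\n') with
        | [] => []
        | _ :: r' => pvSplitNl r') := by
  induction r with
  | nil => simp [pvSplitNl]
  | cons x r' ih =>
    by_cases hx : x = '\n'
    · subst hx; simp [pvSplitNl, List.takeWhile_cons, List.dropWhile_cons]
    · simp only [pvSplitNl, if_neg hx, ih, List.modifyHead_cons,
        List.takeWhile_cons, List.dropWhile_cons, decide_eq_true_eq, hx]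
      simp [hx]

-- ---- words lemmas ----

theorem pvW_word_append (x : Char) (w l : List Char) (hx : pvNS x = true)
    (hw : w.all pvNS = true) :
    pvW ((x :: w) ++ l) = (x :: w ++ l.takeWhile pvNS) :: pvW (l.dropWhile pvNS) := by
  have hxs : ¬ PySem.Chars.isspace x = true := by simpa [pvNS] using hx
  have htw : (w.takeWhile pvNS).length = w.length := by
    rw [List.takeWhile_eq_self_iff.2 (List.all_eq_true.1 hw)]
  have hdw : (w.dropWhile pvNS).isEmpty = true := by
    rw [List.dropWhile_eq_nil_iff.2 (List.all_eq_true.1 hw)]; rfl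
  simp only [List.cons_append, pvW, if_neg hxs, List.takeWhile_append, htw, if_pos rfl,
    List.dropWhile_append, hdw, if_pos rfl]
  simp [List.takeWhile_eq_self_iff.2 (List.all_eq_true.1 hw)]

theorem pvW_of_word (w : List Char) (hw : w.all pvNS = true) :
    pvW w = if w.isEmpty then [] else [w] := by
  cases w with
  | nil => simp [pvW]
  | cons x w' =>
    rw [List.all_cons, Bool.and_eq_true] at hw
    have h := pvW_word_append x w' [] hw.1 hw.2
    simp only [List.append_nil, List.takeWhile_nil, List.dropWhile_nil] at h
    simp [h, pvW]

theorem pvW_sep (w : List Char) (c : Char) (t : List Char)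
    (hw : w.all pvNS = true) (hc : PySem.Chars.isspace c = true) :
    pvW (w ++ c :: t) = (if w.isEmpty then [] else [w]) ++ pvW t := by
  cases w with
  | nil => simp [pvW, hc]
  | cons x w' =>
    have hx : pvNS x = true := by simp [List.all_eq_true] at hw; exact hw.1
    have hw' : w'.all pvNS = true := by
      simp [List.all_eq_true] at hw ⊢; exact fun a ha => hw.2 a ha
    rw [pvW_word_append x w' (c :: t) hx hw']
    have hcns : pvNS c = false := by simp [pvNS, hc]
    simp [List.takeWhile_cons, List.dropWhile_cons, hcns, pvW, hc]

-- splitting words at a whitespace character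
theorem pvW_split (a : List Char) (c : Char) (b : List Char) (hc : PySem.Chars.isspace c = true) :
    pvW (a ++ c :: b) = pvW a ++ pvW b := by
  induction hn : a.length using Nat.strong_induction_on generalizing a b with
  | _ n ih =>
  subst hn
  cases a with
  | nil => simp [pvW, hc]
  | cons x a' =>
    by_cases hx : PySem.Chars.isspace x = true
    · simp only [List.cons_append, pvW, if_pos hx]
      exact ih a'.length (by simp) a' b rfl
    · simp only [List.cons_append, pvW, if_neg hx]
      by_cases ha : a'.all pvNS = true
      · have htw : (a'.takeWhile pvNS).length = a'.length := by
          rw [List.takeWhile_eq_self_iff.2 (List.all_eq_true.1 ha)]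
        have hdw : (a'.dropWhile pvNS).isEmpty = true := by
          rw [List.dropWhile_eq_nil_iff.2 (List.all_eq_true.1 ha)]; rfl
        have hcns : pvNS c = false := by simp [pvNS, hc]
        rw [List.takeWhile_append, if_pos htw, List.dropWhile_append, if_pos hdw]
        rw [List.takeWhile_eq_self_iff.2 (List.all_eq_true.1 ha),
          List.dropWhile_eq_nil_iff.2 (List.all_eq_true.1 ha)]
        simp [List.takeWhile_cons, List.dropWhile_cons, hcns, pvW, hc]
      · have htw : ¬ (a'.takeWhile pvNS).length = a'.length := by
          intro h
          exact ha (by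
            have heq : a'.takeWhile pvNS = a' := (List.takeWhile_prefix pvNS).eq_of_length h
            exact List.all_eq_true.2 (List.takeWhile_eq_self_iff.1 heq))
        have hdw : ¬ (a'.dropWhile pvNS).isEmpty = true := by
          intro h
          exact ha (by
            exact List.all_eq_true.2 (List.dropWhile_eq_nil_iff.1 (by simpa [List.isEmpty_iff] using h)))
        rw [List.takeWhile_append, if_neg htw, List.dropWhile_append, if_neg hdw]
        have hlen : (a'.dropWhile pvNS).length < (x :: a').length := by
          have := List.length_dropWhile_le pvNS a'; simp; omega
        rw [ih (a'.dropWhile pvNS).length hlen (a'.dropWhile pvNS) b rfl]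

theorem pvW_all_space (l : List Char) (h : l.all PySem.Chars.isspace = true) : pvW l = [] := by
  induction l with
  | nil => simp [pvW]
  | cons c r ih =>
    simp [List.all_eq_true] at h
    simp [pvW, h.1, ih (by simp [List.all_eq_true]; exact h.2)]

-- words of a singly-separated join = concatenation of the words
theorem pvW_pvJ (s : Char) (hs : PySem.Chars.isspace s = true) (xs : List (List Char)) :
    pvW (pvJ [s] xs) = xs.flatMap pvW := by
  induction xs with
  | nil => simp [pvJ, pvW]
  | cons x xs ih =>
    cases xs with
    | nil => simp [pvJ]
    | cons y r =>
      have : pvJ [s] (x :: y :: r) = x ++ s :: pvJ [s] (y :: r) := by simp [pvJ]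
      rw [this, pvW_split _ _ _ hs, ih]
      simp

-- ---- split₀ = pvW ----

theorem pvSplit₀_go (l : List Char) : ∀ (cur : List Char) (acc : List (List Char)),
    cur.all pvNS = true →
    PySem.Chars.split₀.go l cur acc = acc.reverse ++ pvW (cur.reverse ++ l) := by
  induction l with
  | nil =>
    intro cur acc hcur
    rw [PySem.Chars.split₀.go]
    have hrev : cur.reverse.all pvNS = true := by simpa using hcur
    rw [List.append_nil, pvW_of_word cur.reverse hrev]
    cases cur with
    | nil => simp
    | cons a t => simp
  | cons c rest ih =>
    intro cur acc hcur
    rw [PySem.Chars.split₀.go]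
    by_cases hc : PySem.Chars.isspace c = true
    · rw [if_pos hc]
      have hrev : cur.reverse.all pvNS = true := by simpa using hcur
      rw [pvW_sep cur.reverse c rest hrev hc]
      cases cur with
      | nil =>
        rw [if_pos (by simp)]
        rw [ih [] acc (by simp)]
        simp
      | cons a t =>
        rw [if_neg (by simp)]
        rw [ih [] ((a :: t).reverse :: acc) (by simp)]
        simp
    · rw [if_neg hc]
      have hcur' : (c :: cur).all pvNS = true := by
        rw [List.all_cons, Bool.and_eq_true]
        exact ⟨by simp [pvNS, hc], hcur⟩
      rw [ih (c :: cur) acc hcur']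
      simp

theorem pvSplit₀_eq (l : List Char) : PySem.Chars.split₀ l = pvW l := by
  rw [PySem.Chars.split₀, pvSplit₀_go l [] [] (by simp)]
  simp

-- ---- splitOn ['\n'] = pvSplitNl ----

theorem pvSplitOn_go (fuel : Nat) : ∀ (l cur : List Char) (acc : List (List Char)),
    l.length < fuel →
    PySem.Chars.splitOn.go ['\n'] fuel l cur acc =
      acc.reverse ++ (pvSplitNl l).modifyHead (cur.reverse ++ ·) := by
  induction fuel with
  | zero => intro l cur acc h; omega
  | succ fuel ih =>
    intro l cur acc h
    cases l with
    | nil =>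
      rw [PySem.Chars.splitOn.go]
      · simp [pvSplitNl]
      · omega
    | cons c rest =>
      rw [PySem.Chars.splitOn.go]
      by_cases hc : c = '\n'
      · subst hc
        rw [if_pos (by simp)]
        rw [show List.drop (['\n'] : List Char).length ('\n' :: rest) = rest from rfl]
        rw [ih rest [] (cur.reverse :: acc) (by simp at h; omega)]
        rw [show pvSplitNl ('\n' :: rest) = [] :: pvSplitNl rest from by simp [pvSplitNl]]
        cases hsp : pvSplitNl rest with
        | nil => exact absurd hsp (pvSplitNl_ne_nil rest)
        | cons a t => simp
      · rw [if_neg (by intro hcon; simp at hcon; exact hc hcon.symm)]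
        rw [ih rest (c :: cur) acc (by simp at h; omega)]
        rw [show pvSplitNl (c :: rest) = (pvSplitNl rest).modifyHead (c :: ·) from by
        simp [pvSplitNl, hc]]
        cases hsp : pvSplitNl rest with
        | nil => exact absurd hsp (pvSplitNl_ne_nil rest)
        | cons a t => simp

theorem pvSplitOn_eq (l : List Char) :
    PySem.Chars.splitOn l ['\n'] = pvSplitNl l := by
  rw [PySem.Chars.splitOn, pvSplitOn_go (l.length + 1) l [] [] (by omega)]
  cases hsp : pvSplitNl l with
  | nil => exact absurd hsp (pvSplitNl_ne_nil l)
  | cons a t => simp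

-- ---- the comment-truncation expression of A = takeWhile (· ≠ '#') ----

theorem pvPrefix_singleton (a : Char) (l : List Char) : [a] <+: l ↔ l.head? = some a := by
  cases l with
  | nil => simp
  | cons x t =>
    constructor
    · intro h
      rcases h with ⟨s, hs⟩
      simp at hs
      simp [hs.1]
    · intro h
      simp at h
      subst h
      exact ⟨t, by simp⟩

theorem pvTakeWhile_eq_take (l : List Char) (k : Nat)
    (hk : l[k]? = some '#') (hmin : ∀ i, i < k → l[i]? ≠ some '#') :
    l.takeWhile (· ≠ '#') = l.take k := by
  induction l generalizing k with
  | nil => simp at hk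
  | cons c r ih =>
    cases k with
    | zero =>
      simp at hk
      simp [List.takeWhile_cons, hk]
    | succ k' =>
      have hc : c ≠ '#' := by
        intro hc
        exact hmin 0 (by omega) (by simp [hc])
      simp only [List.takeWhile_cons, decide_eq_true_eq, hc, List.take_succ_cons]
      rw [ih k' (by simpa using hk) (fun i hi => by
        have := hmin (i + 1) (by omega)
        simpa using this)]
      simp [hc]

theorem pvClean_eq (ln : List Char) :
    (if PySem.Chars.isIn ['#'] ln = true then
        PySem.Chars.slice ln none (some (PySem.Chars.find ln ['#']))
      else ln) = pvTrunc ln := by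
  by_cases h : PySem.Chars.isIn ['#'] ln = true
  · rw [if_pos h]
    have hinf : ['#'] <:+: ln := (PySem.Chars.isIn_iff_infix _ _).1 h
    have hpos : 0 ≤ PySem.Chars.find ln ['#'] := (PySem.Chars.find_nonneg_iff _ _).2 hinf
    obtain ⟨hpre, hmin⟩ := PySem.Chars.find_spec hpos
    have hk : ln[(PySem.Chars.find ln ['#']).toNat]? = some '#' := by
      rw [← List.head?_drop]
      exact (pvPrefix_singleton '#' _).1 hpre
    have hminx : ∀ i, i < (PySem.Chars.find ln ['#']).toNat → ln[i]? ≠ some '#' := by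
      intro i hi hc
      exact hmin i hi ((pvPrefix_singleton '#' _).2 (by rw [List.head?_drop]; exact hc))
    rw [PySem.Chars.slice_eq_listSlice, PySem.List.slice_to ln hpos]
    simp only [pvTrunc]
    rw [pvTakeWhile_eq_take ln _ hk hminx]
  · rw [if_neg h]
    have hninf : ¬ ['#'] <:+: ln := (PySem.Chars.isIn_eq_false_iff _ _).1 (by simpa using h)
    have hnm : '#' ∉ ln := by
      intro hm
      obtain ⟨s, t, hst⟩ := List.append_of_mem hm
      exact hninf ⟨s, t, by simp [hst]⟩
    simp only [pvTrunc]
    rw [List.takeWhile_eq_self_iff.2 (fun x hx => by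
      simp only [decide_eq_true_eq]
      intro hxe; exact hnm (hxe ▸ hx))]

-- ---- strip empty → all whitespace → no words ----

theorem pvStrip_empty (l : List Char) (h : (PySem.Chars.strip l).isEmpty = true) :
    l.all PySem.Chars.isspace = true := by
  have h1 : PySem.Chars.strip l = [] := by simpa [List.isEmpty_iff] using h
  rw [PySem.Chars.strip, PySem.Chars.rstrip, PySem.Chars.lstrip] at h1
  have h2 : (l.dropWhile PySem.Chars.isspace).reverse.dropWhile PySem.Chars.isspace = [] := by
    simpa using h1
  have h3 := List.dropWhile_eq_nil_iff.1 h2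
  have h4 : ∀ x ∈ l.dropWhile PySem.Chars.isspace, PySem.Chars.isspace x = true := by
    intro x hx; exact h3 x (by simpa using hx)
  rw [List.all_eq_true]
  intro x hx
  rcases List.mem_append.1 ((List.takeWhile_append_dropWhile (p := PySem.Chars.isspace) (l := l)) ▸ hx) with h5 | h5
  · exact List.mem_takeWhile_imp h5
  · exact h4 x h5

-- filtering out all-space lines does not change the word lists
theorem pvFilter_flatMap (ys : List (List Char)) :
    (ys.filter (fun x => (PySem.Chars.strip x).isEmpty = false)).flatMap pvW = ys.flatMap pvW := by
  induction ys with
  | nil => simp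
  | cons y ys ih =>
    rw [List.filter_cons]
    by_cases h : (PySem.Chars.strip y).isEmpty = true
    · rw [if_neg (by simp [h])]
      rw [ih, List.flatMap_cons, pvW_all_space y (pvStrip_empty y h), List.nil_append]
    · rw [if_pos (by simpa using h)]
      rw [List.flatMap_cons, List.flatMap_cons, ih]

theorem pvDropWhile_head (p : Char → Bool) (l : List Char) (d : Char) (r' : List Char)
    (h : l.dropWhile p = d :: r') : p d = false := by
  induction l with
  | nil => simp at h
  | cons x xs ih =>
    rw [List.dropWhile_cons] at h
    by_cases hp : p x = true
    · rw [if_pos hp] at h; exact ih h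
    · rw [if_neg hp] at h
      cases h
      simpa using hp

-- ---- the central identity: per-line truncation rejoined on '\n' = single-pass comment removal ----

theorem pvDC_eq (l : List Char) :
    pvJ ['\n'] ((pvSplitNl l).map pvTrunc) = pvDC l := by
  induction hn : l.length using Nat.strong_induction_on generalizing l with
  | _ n ih =>
  subst hn
  cases l with
  | nil => simp [pvSplitNl, pvJ, pvTrunc, pvDC]
  | cons c r =>
    by_cases hc : c = '\n'
    · subst hc
      rw [show pvSplitNl ('\n' :: r) = [] :: pvSplitNl r from by simp [pvSplitNl]]
      rw [List.map_cons]
      cases hsp : (pvSplitNl r).map pvTrunc with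
      | nil => exact absurd (by simpa using hsp) (pvSplitNl_ne_nil r)
      | cons a t =>
        have : pvJ ['\n'] (pvTrunc [] :: a :: t) = pvTrunc [] ++ ['\n'] ++ pvJ ['\n'] (a :: t) := by
          simp [pvJ]
        rw [this, ← hsp, ih r.length (by simp) r rfl]
        simp [pvTrunc, pvDC]
    · by_cases hh : c = '#'
      · subst hh
        rw [show pvSplitNl ('#' :: r) = (pvSplitNl r).modifyHead ('#' :: ·) by simp [pvSplitNl]]
        rw [pvSplitNl_eq r]
        simp only [List.modifyHead_cons, List.map_cons]
        have htr : pvTrunc ('#' :: r.takeWhile (· ≠ '\n')) = [] := by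
          simp [pvTrunc]
        rw [htr]
        cases hd : r.dropWhile (· ≠ '\n') with
        | nil =>
          rw [show pvDC ('#' :: r) = pvDC (r.dropWhile (· ≠ '\n')) by simp [pvDC], hd]
          simp [pvJ, pvDC]
        | cons d r' =>
          have hdn : d = '\n' := by
            have := pvDropWhile_head (fun c => decide (c ≠ '\n')) r d r' hd
            simpa using this
          subst hdn
          cases hsp : (pvSplitNl r').map pvTrunc with
          | nil => exact absurd (by simpa using hsp) (pvSplitNl_ne_nil r')
          | cons a t =>
            have hj : pvJ ['\n'] ([] :: a :: t) = '\n' :: pvJ ['\n'] (a :: t) := by simp [pvJ]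
            rw [hj, ← hsp]
            have hr' : r'.length < ('#' :: r).length := by
              have := List.length_dropWhile_le (fun c => decide (c ≠ '\n')) r
              rw [hd] at this
              simp at this ⊢
              omega
            rw [ih r'.length hr' r' rfl]
            rw [show pvDC ('#' :: r) = pvDC (r.dropWhile (· ≠ '\n')) by simp [pvDC]]
            rw [hd]
            simp [pvDC]
      · simp only [pvSplitNl, if_neg hc]
        cases hsp : pvSplitNl r with
        | nil => exact absurd hsp (pvSplitNl_ne_nil r)
        | cons a t =>
          simp only [List.modifyHead_cons, List.map_cons]
          have htr : pvTrunc (c :: a) = c :: pvTrunc a := by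
            simp [pvTrunc, hh]
          rw [htr]
          have hj : ∀ (x : List Char) (ys : List (List Char)),
              pvJ ['\n'] ((c :: x) :: ys) = c :: pvJ ['\n'] (x :: ys) := by
            intro x ys
            cases ys with
            | nil => simp [pvJ]
            | cons y ys' => simp [pvJ]
          rw [hj]
          rw [show (pvTrunc a :: t.map pvTrunc) = ((a :: t).map pvTrunc) by simp]
          rw [← hsp, ih r.length (by simp) r rfl]
          simp [pvDC, hh]

-- ---- A's accumulating loop = filter ∘ map ----

theorem pvFoldA (ls : List (List Char)) (acc : List (List Char)) :
    ls.foldl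
      (fun lines line =>
        let clean_line : List Char :=
          if PySem.Chars.isIn ['#'] line = true then
            PySem.Chars.slice line none (some (PySem.Chars.find line ['#']))
          else line
        if (PySem.Chars.strip clean_line).isEmpty = false then lines ++ [clean_line] else lines)
      acc
    = acc ++ (ls.map pvTrunc).filter (fun x => (PySem.Chars.strip x).isEmpty = false) := by
  induction ls generalizing acc with
  | nil => simp
  | cons x ls ih =>
    simp only [List.foldl_cons, List.map_cons, List.filter_cons]
    rw [pvClean_eq x]
    by_cases h : (PySem.Chars.strip (pvTrunc x)).isEmpty = false
    · rw [if_pos h, ih, if_pos (by simpa using h)]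
      simp
    · rw [if_neg h, ih, if_neg (by simpa using h)]

-- ---- B's loop invariants ----

def pvRunB (l : List Char) (st : Bool × List Char × List (List Char)) : List (List Char) :=
  let st' := l.foldl pvStepB st
  if st'.2.1.isEmpty = true then st'.2.2 else st'.2.2 ++ [st'.2.1]

theorem pvRunB_true (l : List Char) : ∀ (w : List Char) (ws : List (List Char)),
    pvRunB l (true, w, ws) = pvRunB (l.dropWhile (· ≠ '\n')) (false, w, ws) := by
  induction l with
  | nil => intro w ws; simp [pvRunB]
  | cons c r ih =>
    intro w ws
    by_cases hc : c = '\n'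
    · subst hc
      rw [show List.dropWhile (fun x => decide (x ≠ '\n')) ('\n' :: r) = '\n' :: r from by simp]
      rw [show pvRunB ('\n' :: r) (true, w, ws) = pvRunB r (pvStepB (true, w, ws) '\n') from rfl]
      rw [show pvRunB ('\n' :: r) (false, w, ws) = pvRunB r (pvStepB (false, w, ws) '\n') from rfl]
      rw [show pvStepB (true, w, ws) '\n' = pvStepB (false, w, ws) '\n' from by simp [pvStepB]]
    · rw [show pvRunB (c :: r) (true, w, ws) = pvRunB r (pvStepB (true, w, ws) c) from rfl]
      rw [show pvStepB (true, w, ws) c = (true, w, ws) from by simp [pvStepB, hc]]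
      rw [ih w ws]
      rw [show List.dropWhile (fun x => decide (x ≠ '\n')) (c :: r) =
        List.dropWhile (fun x => decide (x ≠ '\n')) r from by simp [hc]]

theorem pvRunB_false (l : List Char) : ∀ (w : List Char) (ws : List (List Char)),
    w.all pvNS = true →
    pvRunB l (false, w, ws) = ws ++ pvW (w ++ pvDC l) := by
  induction hn : l.length using Nat.strong_induction_on generalizing l with
  | _ n ih =>
  subst hn
  cases l with
  | nil =>
    intro w ws hw
    rw [show pvDC [] = [] from by simp [pvDC], List.append_nil]
    rw [show pvRunB [] (false, w, ws) =
      (if w.isEmpty = true then ws else ws ++ [w]) from rfl]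
    rw [pvW_of_word w hw]
    cases w with
    | nil => simp
    | cons a t => simp
  | cons c r =>
    intro w ws hw
    rw [show pvRunB (c :: r) (false, w, ws) = pvRunB r (pvStepB (false, w, ws) c) from rfl]
    by_cases hh : c = '#'
    · subst hh
      rw [show pvStepB (false, w, ws) '#' = (true, w, ws) from by simp [pvStepB]]
      rw [pvRunB_true r w ws]
      have hlen : (r.dropWhile (· ≠ '\n')).length < ('#' :: r).length := by
        have := List.length_dropWhile_le (fun c : Char => decide (c ≠ '\n')) r
        simp only [List.length_cons]
        omega
      rw [ih (r.dropWhile (· ≠ '\n')).length hlen (r.dropWhile (· ≠ '\n')) rfl w ws hw]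
      rw [show pvDC ('#' :: r) = pvDC (r.dropWhile (· ≠ '\n')) from by simp [pvDC]]
    · by_cases hc : PySem.Chars.isspace c = true
      · rw [show pvStepB (false, w, ws) c =
            (false, [], if w.isEmpty = true then ws else ws ++ [w]) from by
          by_cases hcn : c = '\n'
          · subst hcn
            simp [pvStepB, show PySem.Chars.isspace '\n' = true from by decide]
          · simp [pvStepB, hcn, hh, hc]]
        rw [ih r.length (by simp) r rfl [] (if w.isEmpty = true then ws else ws ++ [w]) (by simp)]
        rw [show pvDC (c :: r) = c :: pvDC r from by simp [pvDC, hh]]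
        rw [pvW_sep w c (pvDC r) hw hc]
        cases w with
        | nil => simp
        | cons a t => simp
      · have hcn : c ≠ '\n' := by
          intro h; subst h; exact hc (by decide)
        rw [show pvStepB (false, w, ws) c = (false, w ++ [c], ws) from by
          simp [pvStepB, hcn, hh, hc]]
        have hw' : (w ++ [c]).all pvNS = true := by
          rw [List.all_append, Bool.and_eq_true]
          exact ⟨hw, by simp [pvNS, hc]⟩
        rw [ih r.length (by simp) r rfl (w ++ [c]) ws hw']
        rw [show pvDC (c :: r) = c :: pvDC r from by simp [pvDC, hh]]
        simp

-- ---- main ----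

theorem pvMain (s : String) : preprocess_rule_string_py s = preprocess_rule_string_py_alt s := by
  unfold preprocess_rule_string_py preprocess_rule_string_py_alt
  simp only [pvJoin_eq, pvSplit₀_eq, pvSplitOn_eq]
  rw [pvFoldA, List.nil_append]
  rw [pvW_pvJ ' ' (by decide) _]
  rw [pvFilter_flatMap]
  rw [← pvW_pvJ '\n' (by decide) _]
  rw [pvDC_eq]
  have hB := pvRunB_false s.toList [] [] (by simp)
  simp only [pvRunB, List.nil_append] at hB
  rw [← hB]

-- ===== VERDICT (by name: the statement is the Claim_ definition above) =====
theorem preprocess_rule_string_py_spec : Claim_equal_preprocess_rule_string_py := by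
  intro s _
  unfold Spec_preprocess_rule_string_py
  exact pvMain s
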